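-- pv_equiv track=rewrite | github.com/masoom-patel/icd_stat | utils/preprocessing.py | create_feature_groups
-- ===== SOURCE A (Python) =====
-- from typing import List, Dict, Optional, Tuple, Union, Any
--
-- def create_feature_groups(
--                         feature_names: List[str]) -> Dict[str, List[str]]:
--     """
--     Group features by type for analysis.
--
--     Args:
--         feature_names: List of feature names
--
--     Returns:
--         Dictionary mapping group names to feature lists
--     """
--     feature_groups = {
--         'embedding': [],
--         'demographic': [],
--         'statistical': [],
--         'rule_based': [],
--         'similarity': [],
--         'other': []
--     }
--
--     for feature_name in feature_names:
--         name_lower = feature_name.lower()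
--
--         if 'embedding' in name_lower or 'cosine' in name_lower:
--             feature_groups['similarity'].append(feature_name)
--         elif any(demo in name_lower for demo in ['age', 'gender', 'demographic']):
--             feature_groups['demographic'].append(feature_name)
--         elif any(stat in name_lower for stat in ['count', 'entropy', 'variance', 'frequency']):
--             feature_groups['statistical'].append(feature_name)
--         elif 'rule' in name_lower or 'trigger' in name_lower:
--             feature_groups['rule_based'].append(feature_name)
--         elif any(emb in name_lower for emb in ['embed', 'vector', 'similarity']):
--             feature_groups['embedding'].append(feature_name)
--         else:
--             feature_groups['other'].append(feature_name)
--
--     return feature_groups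
-- ===== SOURCE B (Python) =====
-- RULES = [
--     ('similarity', ['embedding', 'cosine']),
--     ('demographic', ['age', 'gender', 'demographic']),
--     ('statistical', ['count', 'entropy', 'variance', 'frequency']),
--     ('rule_based', ['rule', 'trigger']),
--     ('embedding', ['embed', 'vector', 'similarity']),
-- ]
--
-- GROUP_ORDER = ['embedding', 'demographic', 'statistical', 'rule_based',
--                'similarity', 'other']
--
--
-- def _classify(feature_name):
--     name_lower = feature_name.lower()
--     for group, keywords in RULES:
--         if any(k in name_lower for k in keywords):
--             return group
--     return 'other'
--
--
-- def create_feature_groups(feature_names):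
--     return {g: [n for n in feature_names if _classify(n) == g]
--             for g in GROUP_ORDER}
-- ===== Notes on version B (the rewrite author's own statement) =====
-- stated objective: idiomatic
-- what changed: Replaces A's six-way if/elif cascade appending inside one loop by an ordered keyword-rule table with a first-match classifier, building the result as one filtered list per group via a dict comprehension.
import Mathlib
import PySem

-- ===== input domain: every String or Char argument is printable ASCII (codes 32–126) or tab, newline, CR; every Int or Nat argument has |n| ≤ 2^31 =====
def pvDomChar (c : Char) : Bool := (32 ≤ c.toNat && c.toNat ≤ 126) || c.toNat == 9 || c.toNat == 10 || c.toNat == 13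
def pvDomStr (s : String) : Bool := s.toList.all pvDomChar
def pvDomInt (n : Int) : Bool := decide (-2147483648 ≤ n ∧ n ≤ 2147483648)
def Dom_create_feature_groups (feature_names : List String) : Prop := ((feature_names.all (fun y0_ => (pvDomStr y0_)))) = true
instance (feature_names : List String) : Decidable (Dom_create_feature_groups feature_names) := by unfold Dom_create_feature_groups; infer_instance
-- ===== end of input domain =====

-- B replaces A's six-way if/elif cascade by a data-driven rule table and builds the result
-- as one filtered list per group (a dict comprehension) instead of appending inside one loop (objective: idiomatic).

-- ===== PORT A =====
-- loop body of A's for-loop (the if/elif cascade), as in the source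
def pvStepA (fg : PySem.Dict String (List String)) (feature_name : String) : PySem.Dict String (List String) :=
  let name_lower := PySem.Str.lower feature_name
  if PySem.Str.isIn "embedding" name_lower || PySem.Str.isIn "cosine" name_lower then
    fg.modify "similarity" [] (· ++ [feature_name])
  else if ["age", "gender", "demographic"].any (fun demo => PySem.Str.isIn demo name_lower) then
    fg.modify "demographic" [] (· ++ [feature_name])
  else if ["count", "entropy", "variance", "frequency"].any (fun stat => PySem.Str.isIn stat name_lower) then
    fg.modify "statistical" [] (· ++ [feature_name])
  else if PySem.Str.isIn "rule" name_lower || PySem.Str.isIn "trigger" name_lower then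
    fg.modify "rule_based" [] (· ++ [feature_name])
  else if ["embed", "vector", "similarity"].any (fun emb => PySem.Str.isIn emb name_lower) then
    fg.modify "embedding" [] (· ++ [feature_name])
  else
    fg.modify "other" [] (· ++ [feature_name])

def create_feature_groups (feature_names : List String) : List (String × List String) :=
  (feature_names.foldl pvStepA
    (PySem.Dict.ofList
      [("embedding", []), ("demographic", []), ("statistical", []),
       ("rule_based", []), ("similarity", []), ("other", [])])).items

-- ===== PORT B =====
def pvRules : List (String × List String) :=
  [("similarity", ["embedding", "cosine"]),
   ("demographic", ["age", "gender", "demographic"]),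
   ("statistical", ["count", "entropy", "variance", "frequency"]),
   ("rule_based", ["rule", "trigger"]),
   ("embedding", ["embed", "vector", "similarity"])]

def pvGroupOrder : List String :=
  ["embedding", "demographic", "statistical", "rule_based", "similarity", "other"]

-- Source B's _classify: first rule whose keyword list matches, else 'other'
def pvClassify (feature_name : String) : String :=
  let name_lower := PySem.Str.lower feature_name
  match pvRules.find? (fun r => r.2.any (fun k => PySem.Str.isIn k name_lower)) with
  | some r => r.1
  | none => "other"

def create_feature_groups_alt (feature_names : List String) : List (String × List String) :=
  pvGroupOrder.map (fun g => (g, feature_names.filter (fun n => pvClassify n == g)))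

-- ===== PRECONDITION & SPEC =====
def Spec_create_feature_groups (feature_names : List String) (out : List (String × List String)) : Prop := out = create_feature_groups_alt feature_names
instance (feature_names : List String) (out : List (String × List String)) : Decidable (Spec_create_feature_groups feature_names out) := by unfold Spec_create_feature_groups; infer_instance

-- ===== CLAIM (what is proved, stated in full; the proofs are below) =====
def Claim_equal_create_feature_groups : Prop := ∀ (feature_names : List String), Dom_create_feature_groups feature_names → Spec_create_feature_groups feature_names (create_feature_groups feature_names)

-- ===== LEMMAS AND PROOFS =====

-- A's cascade picks exactly the group pvClassify names
lemma pvStepA_eq (fg : PySem.Dict String (List String)) (name : String) :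
    pvStepA fg name = fg.modify (pvClassify name) [] (· ++ [name]) := by
  simp only [pvStepA, pvClassify, pvRules, List.find?_cons, List.any_cons, List.any_nil, Bool.or_false]
  by_cases c1 : (PySem.Str.isIn "embedding" (PySem.Str.lower name) || PySem.Str.isIn "cosine" (PySem.Str.lower name)) = true <;>
  by_cases c2 : (PySem.Str.isIn "age" (PySem.Str.lower name) || (PySem.Str.isIn "gender" (PySem.Str.lower name) || PySem.Str.isIn "demographic" (PySem.Str.lower name))) = true <;>
  by_cases c3 : (PySem.Str.isIn "count" (PySem.Str.lower name) || (PySem.Str.isIn "entropy" (PySem.Str.lower name) || (PySem.Str.isIn "variance" (PySem.Str.lower name) || PySem.Str.isIn "frequency" (PySem.Str.lower name)))) = true <;>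
  by_cases c4 : (PySem.Str.isIn "rule" (PySem.Str.lower name) || PySem.Str.isIn "trigger" (PySem.Str.lower name)) = true <;>
  by_cases c5 : (PySem.Str.isIn "embed" (PySem.Str.lower name) || (PySem.Str.isIn "vector" (PySem.Str.lower name) || PySem.Str.isIn "similarity" (PySem.Str.lower name))) = true <;>
  simp only [c1, c2, c3, c4, c5, Bool.not_eq_true] at * <;>
  simp_all

lemma pvClassify_mem (name : String) : pvClassify name ∈ pvGroupOrder := by
  simp only [pvClassify, pvGroupOrder]
  split
  · rename_i r h
    have hm := List.mem_of_find?_eq_some h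
    simp only [pvRules, List.mem_cons, List.not_mem_nil, or_false] at hm
    rcases hm with h'|h'|h'|h'|h' <;> subst h' <;> simp
  · simp

-- ===== VERDICT (by name: the statement is the Claim_ definition above) =====

theorem create_feature_groups_spec : Claim_equal_create_feature_groups := by
  intro fns _
  unfold Spec_create_feature_groups create_feature_groups create_feature_groups_alt
  set d0 : PySem.Dict String (List String) := PySem.Dict.ofList
      [("embedding", []), ("demographic", []), ("statistical", []),
       ("rule_based", []), ("similarity", []), ("other", [])] with hd0
  rw [PySem.List.foldl_congr_mem (l := fns) (f := pvStepA)
      (g := fun d n => d.modify (pvClassify n) [] (· ++ [n])) (init := d0)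
      (fun acc x _ => pvStepA_eq acc x)]
  have hkeys : (fns.foldl (fun d n => d.modify (pvClassify n) [] (· ++ [n])) d0).keys = pvGroupOrder := by
    rw [PySem.Dict.keys_foldl_modify_key fns pvClassify [] (fun _ n => (· ++ [n])) d0]
    have hk0 : d0.keys = pvGroupOrder := by decide
    rw [hk0, PySem.Set.update_eq_append_filter]
    have hnil : (PySem.Set.ofList (fns.map pvClassify)).filter
        (fun y => !(PySem.Set.contains pvGroupOrder y)) = [] := by
      rw [List.filter_eq_nil_iff]
      intro y hy
      have h1 : y ∈ fns.map pvClassify := (PySem.List.mem_dedup _ y).mp hy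
      rcases List.mem_map.mp h1 with ⟨n, _, rfl⟩
      simp
      exact pvClassify_mem n
    rw [hnil, List.append_nil]
  have hnodup : (fns.foldl (fun d n => d.modify (pvClassify n) [] (· ++ [n])) d0).keys.Nodup := by
    rw [hkeys]; decide
  rw [PySem.Dict.items_eq_map_keys _ hnodup [], hkeys]
  have hget : ∀ k : String,
      (fns.foldl (fun d n => d.modify (pvClassify n) [] (· ++ [n])) d0).getD k []
        = d0.getD k [] ++ fns.filter (fun n => pvClassify n == k) := by
    intro k
    have hfold : fns.foldl (fun d n => d.modify (pvClassify n) [] (· ++ [n])) d0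
        = (fns.map (fun n => (pvClassify n, n))).foldl
            (fun d p => d.modify p.1 [] (· ++ [p.2])) d0 := by rw [List.foldl_map]
    rw [hfold, PySem.Dict.getD_foldl_modify_append, List.filter_map]
    simp [Function.comp_def]
  simp only [pvGroupOrder, List.map_cons, List.map_nil, hget]
  norm_num [hd0, PySem.Dict.getD, PySem.Dict.get?, PySem.Dict.ofList]
  decide
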